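-- pv_equiv track=rewrite | github.com/pypi-data/pypi-mirror-93 | packages/librapid/librapid-0.0.1.tar.gz/librapid-0.0.1/rapid/ndarray/pretty_print.py | _array1dToString
-- ===== SOURCE A (Python) =====
-- def _array1dToString(arr, stripMiddle):
--     res = "["
--     i = 0
--     # for i in range(len(arr)):
--     while i < len(arr):
--         if stripMiddle and len(arr) > 6 and i == 3:
--             i = len(arr) - 3
--             res += "... "
--
--         res += arr[i]
--
--         if i + 1 < len(arr):
--             res += " "
--
--         i += 1
--     return res + "]"
-- ===== SOURCE B (Python) =====
-- def _array1dToString(arr, stripMiddle):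
--     if stripMiddle and len(arr) > 6:
--         parts = list(arr[:3]) + ["..."] + list(arr[-3:])
--     else:
--         parts = list(arr)
--     return "[" + " ".join(parts) + "]"
-- ===== Notes on version B (the rewrite author's own statement) =====
-- stated objective: simpler
-- what changed: Replaces the while-loop with its index jump and per-element trailing-space conditional by building the parts list up front (slice + '...' + slice, or the whole list) and a single ' '.join.
import Mathlib
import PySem

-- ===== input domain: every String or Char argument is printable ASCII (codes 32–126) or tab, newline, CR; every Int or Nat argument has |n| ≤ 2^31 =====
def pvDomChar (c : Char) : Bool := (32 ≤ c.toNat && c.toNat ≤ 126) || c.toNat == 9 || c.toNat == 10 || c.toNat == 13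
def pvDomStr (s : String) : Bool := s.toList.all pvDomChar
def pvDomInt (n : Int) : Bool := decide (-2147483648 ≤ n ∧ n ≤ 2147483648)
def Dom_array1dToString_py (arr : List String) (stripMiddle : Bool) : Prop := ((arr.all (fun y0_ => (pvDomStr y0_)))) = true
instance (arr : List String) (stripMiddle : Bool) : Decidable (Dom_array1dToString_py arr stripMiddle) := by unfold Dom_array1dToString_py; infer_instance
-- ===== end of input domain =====

-- B builds the parts list (slices + "...") and joins once, instead of A's while-loop with an index jump; same cost, simpler.

-- ===== PORT A =====
-- the while-loop of A; arr[i] is always in range here (i < len, and the jump target len-3 < len), so getD is exact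
def loopA (arr : List String) (strip : Bool) (i : Nat) (res : String) : String :=
  if h : i < arr.length then
    if hb : strip = true ∧ 6 < arr.length ∧ i = 3 then
      let j := arr.length - 3
      let res1 := res ++ "... " ++ arr.getD j ""
      let res2 := if j + 1 < arr.length then res1 ++ " " else res1
      loopA arr strip (j + 1) res2
    else
      let res1 := res ++ arr.getD i ""
      let res2 := if i + 1 < arr.length then res1 ++ " " else res1
      loopA arr strip (i + 1) res2
  else res
termination_by arr.length - i
decreasing_by all_goals omega

def array1dToString_py (arr : List String) (stripMiddle : Bool) : String :=
  loopA arr stripMiddle 0 "[" ++ "]"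

-- ===== PORT B =====
def array1dToString_py_alt (arr : List String) (stripMiddle : Bool) : String :=
  let parts := if stripMiddle = true ∧ 6 < arr.length then
      PySem.List.slice arr none (some 3) ++ ["..."] ++ PySem.List.slice arr (some (-3)) none
    else arr
  "[" ++ PySem.Str.join " " parts ++ "]"

-- ===== PRECONDITION & SPEC =====
def Spec_array1dToString_py (arr : List String) (stripMiddle : Bool) (out : String) : Prop := out = array1dToString_py_alt arr stripMiddle
instance (arr : List String) (stripMiddle : Bool) (out : String) : Decidable (Spec_array1dToString_py arr stripMiddle out) := by unfold Spec_array1dToString_py; infer_instance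

-- ===== CLAIM (what is proved, stated in full; the proofs are below) =====
def Claim_equal_array1dToString_py : Prop := ∀ (arr : List String) (stripMiddle : Bool), Dom_array1dToString_py arr stripMiddle → Spec_array1dToString_py arr stripMiddle (array1dToString_py arr stripMiddle)

-- ===== LEMMAS AND PROOFS =====

theorem join_cons_cons (a b : String) (l : List String) :
    PySem.Str.join " " (a :: b :: l) = a ++ " " ++ PySem.Str.join " " (b :: l) := by
  rw [← String.toList_inj]
  simp [PySem.Str.toList_join, PySem.Chars.join_cons_cons]

theorem join_singleton (a : String) : PySem.Str.join " " [a] = a := by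
  rw [← String.toList_inj]
  simp [PySem.Str.toList_join, PySem.Chars.join_singleton]

theorem join_nil : PySem.Str.join " " ([] : List String) = "" := by
  rw [← String.toList_inj]
  simp [PySem.Str.toList_join, PySem.Chars.join_nil]

theorem join_cons (a : String) (l : List String) (hl : l ≠ []) :
    PySem.Str.join " " (a :: l) = a ++ " " ++ PySem.Str.join " " l := by
  cases l with
  | nil => exact absurd rfl hl
  | cons b t => exact join_cons_cons a b t

theorem loopA_stop (arr : List String) (strip : Bool) (i : Nat) (res : String)
    (h : ¬ i < arr.length) : loopA arr strip i res = res := by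
  rw [loopA, dif_neg h]

theorem loopA_step (arr : List String) (strip : Bool) (i : Nat) (res : String)
    (h : i + 1 < arr.length) (hb : ¬ (strip = true ∧ 6 < arr.length ∧ i = 3)) :
    loopA arr strip i res = loopA arr strip (i + 1) (res ++ arr.getD i "" ++ " ") := by
  rw [loopA, dif_pos (by omega), dif_neg hb]
  simp [h]

theorem loopA_last (arr : List String) (strip : Bool) (i : Nat) (res : String)
    (h : i < arr.length) (h2 : ¬ i + 1 < arr.length)
    (hb : ¬ (strip = true ∧ 6 < arr.length ∧ i = 3)) :
    loopA arr strip i res = loopA arr strip (i + 1) (res ++ arr.getD i "") := by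
  rw [loopA, dif_pos h, dif_neg hb]
  simp [h2]

theorem loopA_jump (arr : List String) (res : String) (h6 : 6 < arr.length) :
    loopA arr true 3 res
      = loopA arr true (arr.length - 2) (res ++ "... " ++ arr.getD (arr.length - 3) "" ++ " ") := by
  rw [loopA, dif_pos (by omega), dif_pos ⟨rfl, h6, rfl⟩]
  have h1 : arr.length - 3 + 1 = arr.length - 2 := by omega
  have h2 : arr.length - 3 + 1 < arr.length := by omega
  simp only [h1]
  rw [if_pos (show arr.length - 2 < arr.length by omega)]

-- when the strip branch can no longer fire, the loop appends the space-join of the rest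
theorem loopA_simple (arr : List String) (strip : Bool) :
    ∀ i res, (strip = false ∨ arr.length ≤ 6 ∨ 3 < i) →
      loopA arr strip i res = res ++ PySem.Str.join " " (arr.drop i) := by
  intro i
  induction hn : arr.length - i using Nat.strong_induction_on generalizing i with
  | _ n ih =>
    intro res hcond
    by_cases h : i < arr.length
    · have hb : ¬ (strip = true ∧ 6 < arr.length ∧ i = 3) := by
        rcases hcond with hc | hc | hc
        · simp [hc]
        · rintro ⟨_, h6, _⟩; omega
        · rintro ⟨_, _, h3⟩; omega
      have hcond' : strip = false ∨ arr.length ≤ 6 ∨ 3 < i + 1 := by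
        rcases hcond with hc | hc | hc
        · exact Or.inl hc
        · exact Or.inr (Or.inl hc)
        · exact Or.inr (Or.inr (by omega))
      have hdrop : arr.drop i = arr[i] :: arr.drop (i + 1) := List.drop_eq_getElem_cons h
      have hgetD : arr.getD i "" = arr[i] := List.getD_eq_getElem arr "" h
      by_cases h2 : i + 1 < arr.length
      · rw [loopA_step arr strip i res h2 hb,
          ih (arr.length - (i + 1)) (by omega) (i + 1) rfl _ hcond', hdrop, hgetD,
          join_cons _ _ (by simp [List.drop_eq_nil_iff]; omega)]
        simp [String.append_assoc]
      · rw [loopA_last arr strip i res h h2 hb,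
          ih (arr.length - (i + 1)) (by omega) (i + 1) rfl _ hcond', hdrop, hgetD]
        have : arr.drop (i + 1) = [] := by simp [List.drop_eq_nil_iff]; omega
        rw [this, join_nil, join_singleton]
        simp
    · rw [loopA_stop arr strip i res h]
      have : arr.drop i = [] := by simp [List.drop_eq_nil_iff]; omega
      rw [this, join_nil]
      simp

-- ===== VERDICT (by name: the statement is the Claim_ definition above) =====
theorem array1dToString_py_spec : Claim_equal_array1dToString_py := by
  intro arr strip _
  unfold Spec_array1dToString_py array1dToString_py array1dToString_py_alt
  by_cases hs : strip = true ∧ 6 < arr.length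
  · obtain ⟨hst, hlen⟩ := hs
    subst hst
    rw [if_pos ⟨rfl, hlen⟩]
    obtain ⟨a, b, c, rest, rfl⟩ : ∃ a b c rest, arr = a :: b :: c :: rest := by
      rcases arr with _ | ⟨a, _ | ⟨b, _ | ⟨c, r⟩⟩⟩ <;> simp at hlen
      exact ⟨a, b, c, r, rfl⟩
    set arr := a :: b :: c :: rest with harr
    have hlen4 : 3 < rest.length := by simp [harr] at hlen ⊢; omega
    have hL : arr.length = rest.length + 3 := by simp [harr]
    -- the last three elements
    have hdlen : (arr.drop (arr.length - 3)).length = 3 := by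
      simp [hL]
    obtain ⟨x, y, z, ht⟩ := List.length_eq_three.mp hdlen
    have hgx : arr.getD (arr.length - 3) "" = x := by
      have h0 : (arr.drop (arr.length - 3))[0]? = arr[arr.length - 3 + 0]? := List.getElem?_drop
      rw [ht] at h0
      simp at h0
      rw [List.getD_eq_getElem?_getD, ← h0]
      rfl
    have hd2 : arr.drop (arr.length - 2) = [y, z] := by
      have : arr.drop (arr.length - 2) = (arr.drop (arr.length - 3)).drop 1 := by
        rw [List.drop_drop]; congr 1
      rw [this, ht]; rfl
    -- unfold A's loop: three plain steps, the jump, then the tail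
    rw [loopA_step arr true 0 _ (by omega) (by rintro ⟨_, _, h⟩; omega),
        loopA_step arr true 1 _ (by omega) (by rintro ⟨_, _, h⟩; omega),
        loopA_step arr true 2 _ (by omega) (by rintro ⟨_, _, h⟩; omega),
        loopA_jump arr _ hlen,
        loopA_simple arr true _ _ (by right; right; omega), hd2, hgx]
    -- B's parts
    have hslice1 : PySem.List.slice arr none (some 3) = [a, b, c] := by
      rw [show (3 : Int) = ((3 : Nat) : Int) by norm_num, PySem.List.slice_to_natCast]
      simp [harr]
    have hslice2 : PySem.List.slice arr (some (-3)) none = [x, y, z] := by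
      rw [PySem.List.slice_from_neg_ofNat arr 3 (by omega)]
      exact ht
    rw [hslice1, hslice2]
    simp only [List.cons_append, List.nil_append]
    rw [show arr.getD 0 "" = a from rfl, show arr.getD 1 "" = b from rfl,
        show arr.getD 2 "" = c from rfl]
    simp only [join_cons_cons, join_singleton]
    have hdots : ∀ R : String, ("... " : String) ++ R = "..." ++ (" " ++ R) := by
      intro R
      rw [← String.append_assoc]
      congr 1
    simp only [String.append_assoc, hdots]
  · rw [if_neg hs]
    have hcond : strip = false ∨ arr.length ≤ 6 ∨ 3 < 0 := by
      cases strip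
      · exact Or.inl rfl
      · right; left
        by_contra h
        exact hs ⟨rfl, by omega⟩
    rw [loopA_simple arr strip 0 "[" hcond, List.drop_zero]
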